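-- pv_equiv track=rewrite | github.com/haejun0410/Algorithm | 백준/Bronze/8295. Rectangles/Rectangles.py | count_rectangles_with_perimeter
-- ===== SOURCE A (Python) =====
-- def count_rectangles_with_perimeter(n, m, p):
--     count = 0
--     for width in range(1, m + 1):
--         for height in range(1, n + 1):
--             perimeter = 2 * (width + height)
--             if perimeter >= p:
--                 count += (m - width + 1) * (n - height + 1)
--     return count
-- ===== SOURCE B (Python) =====
-- def count_rectangles_with_perimeter(n, m, p):
--     count = 0
--     h0_base = (p + 1) // 2  # smallest h+w with 2*(w+h) >= p
--     for width in range(1, m + 1):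
--         h0 = max(1, h0_base - width)
--         if h0 <= n:
--             k = n - h0 + 1
--             count += (m - width + 1) * (k * (k + 1) // 2)
--     return count
-- ===== Notes on version B (the rewrite author's own statement) =====
-- stated objective: faster
-- what changed: B drops A's inner loop over heights: per width it computes the minimum qualifying height as a threshold (p+1)//2 - width and sums the remaining (m-w+1)*(n-h+1) terms via a closed-form triangular number, O(m) instead of O(n*m).
import Mathlib
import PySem

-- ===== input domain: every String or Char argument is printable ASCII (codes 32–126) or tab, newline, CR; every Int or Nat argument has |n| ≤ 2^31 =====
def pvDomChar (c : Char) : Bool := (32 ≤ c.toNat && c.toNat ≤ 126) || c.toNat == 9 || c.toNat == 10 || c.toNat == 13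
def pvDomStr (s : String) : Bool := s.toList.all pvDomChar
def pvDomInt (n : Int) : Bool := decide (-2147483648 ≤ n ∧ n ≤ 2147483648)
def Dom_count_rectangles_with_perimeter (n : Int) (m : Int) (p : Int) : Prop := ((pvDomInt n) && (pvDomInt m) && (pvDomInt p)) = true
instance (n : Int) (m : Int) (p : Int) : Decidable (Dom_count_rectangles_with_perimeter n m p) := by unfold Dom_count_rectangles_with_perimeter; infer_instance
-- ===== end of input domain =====

-- B replaces A's O(n·m) double loop by an O(m) loop: for each width it computes the
-- smallest admissible height by a threshold and sums the remaining arithmetic series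
-- in closed form (faster, asymptotic).

-- ===== PORT A =====
def count_rectangles_with_perimeter (n : Int) (m : Int) (p : Int) : Int :=
  (PySem.List.pyRange 1 (m + 1) 1).foldl (fun count width =>
    (PySem.List.pyRange 1 (n + 1) 1).foldl (fun count height =>
      let perimeter := 2 * (width + height)
      if perimeter ≥ p then count + (m - width + 1) * (n - height + 1) else count)
      count) 0

-- ===== PORT B =====
def count_rectangles_with_perimeter_alt (n : Int) (m : Int) (p : Int) : Int :=
  let h0base := PySem.Int.floordiv (p + 1) 2
  (PySem.List.pyRange 1 (m + 1) 1).foldl (fun count width =>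
    let h0 := max 1 (h0base - width)
    if h0 ≤ n then
      let k := n - h0 + 1
      count + (m - width + 1) * (PySem.Int.floordiv (k * (k + 1)) 2)
    else count) 0

-- ===== PRECONDITION & SPEC =====
def Spec_count_rectangles_with_perimeter (n : Int) (m : Int) (p : Int) (out : Int) : Prop := out = count_rectangles_with_perimeter_alt n m p
instance (n : Int) (m : Int) (p : Int) (out : Int) : Decidable (Spec_count_rectangles_with_perimeter n m p out) := by unfold Spec_count_rectangles_with_perimeter; infer_instance

-- ===== CLAIM (what is proved, stated in full; the proofs are below) =====
def Claim_equal_count_rectangles_with_perimeter : Prop := ∀ (n : Int) (m : Int) (p : Int), Dom_count_rectangles_with_perimeter n m p → Spec_count_rectangles_with_perimeter n m p (count_rectangles_with_perimeter n m p)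

-- ===== LEMMAS AND PROOFS =====

-- Descending series: twice the sum of (n-h+1) over h = n+1-K .. n is K*(K+1).
theorem pv_twice_sum (K : Nat) (n : Int) :
    2 * ((PySem.List.pyRange (n + 1 - K) (n + 1) 1).map (fun h => n - h + 1)).sum
      = (K : Int) * (K + 1) := by
  induction K with
  | zero => simp [PySem.List.pyRange_one_eq_nil]
  | succ K ih =>
    rw [PySem.List.pyRange_one_cons (by push_cast; omega)]
    have hstep : n + 1 - (↑(K + 1) : Int) + 1 = n + 1 - K := by push_cast; omega
    rw [hstep] at *
    simp only [List.map_cons, List.sum_cons]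
    push_cast
    linear_combination ih

-- Threshold: for 1 ≤ h, the perimeter test is equivalent to h being at or above h0.
theorem pv_threshold (w h p : Int) (hh : 1 ≤ h) :
    (2 * (w + h) ≥ p) ↔ max 1 (PySem.Int.floordiv (p + 1) 2 - w) ≤ h := by
  have hd := PySem.Int.floordiv_mul_add_mod (p + 1) 2
  have h0 := PySem.Int.mod_nonneg (p + 1) (by norm_num : (0:Int) < 2)
  have h1 := PySem.Int.mod_lt (p + 1) (by norm_num : (0:Int) < 2)
  omega

-- A fold whose body fixes the accumulator on every list element is the identity.
theorem pv_fold_id (l : List Int) (f : Int → Int → Int) (init : Int)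
    (hf : ∀ (acc : Int), ∀ x ∈ l, f acc x = acc) : l.foldl f init = init := by
  rw [PySem.List.foldl_congr_mem l f (fun acc _ => acc) init hf]
  simp

-- Per-width value of A's inner loop, as B computes it.
theorem pv_inner (n m p w count : Int) :
    (PySem.List.pyRange 1 (n + 1) 1).foldl (fun count height =>
        let perimeter := 2 * (w + height)
        if perimeter ≥ p then count + (m - w + 1) * (n - height + 1) else count) count
      = (let h0 := max 1 (PySem.Int.floordiv (p + 1) 2 - w)
         if h0 ≤ n then
           let k := n - h0 + 1
           count + (m - w + 1) * (PySem.Int.floordiv (k * (k + 1)) 2)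
         else count) := by
  show (PySem.List.pyRange 1 (n + 1) 1).foldl (fun count height =>
        if 2 * (w + height) ≥ p then count + (m - w + 1) * (n - height + 1) else count) count
      = (if max 1 (PySem.Int.floordiv (p + 1) 2 - w) ≤ n then
           count + (m - w + 1) * (PySem.Int.floordiv
             ((n - max 1 (PySem.Int.floordiv (p + 1) 2 - w) + 1) *
              (n - max 1 (PySem.Int.floordiv (p + 1) 2 - w) + 1 + 1)) 2)
         else count)
  set h0 : Int := max 1 (PySem.Int.floordiv (p + 1) 2 - w) with hh0
  have hcond : ∀ h : Int, 1 ≤ h → ((2 * (w + h) ≥ p) ↔ h0 ≤ h) := fun h hh => pv_threshold w h p hh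
  have h1le : 1 ≤ h0 := le_max_left _ _
  by_cases hcase : h0 ≤ n
  · rw [if_pos hcase]
    -- split the height range at h0; on the prefix the test is false, on the suffix true
    rw [PySem.List.pyRange_one_append 1 h0 (n + 1) h1le (by omega), List.foldl_append]
    rw [pv_fold_id _ _ count (by
      intro acc h hm
      rw [PySem.List.mem_pyRange_one] at hm
      exact if_neg (by rw [hcond h hm.1]; omega))]
    rw [PySem.List.foldl_congr_mem _ _ (fun (acc : Int) (h : Int) => acc + (m - w + 1) * (n - h + 1)) count (by
      intro acc h hm
      rw [PySem.List.mem_pyRange_one] at hm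
      exact if_pos (by rw [hcond h (by omega)]; exact hm.1))]
    rw [PySem.List.foldl_add]
    -- sum the descending series in closed form
    have hK : n + 1 - ((n - h0 + 1).toNat : Int) = h0 := by omega
    have hsum := pv_twice_sum (n - h0 + 1).toNat n
    rw [hK] at hsum
    have hcast : (((n - h0 + 1).toNat : Int)) = n - h0 + 1 := by omega
    rw [hcast] at hsum
    have hmul : ((PySem.List.pyRange h0 (n + 1) 1).map (fun h => (m - w + 1) * (n - h + 1))).sum
        = (m - w + 1) * ((PySem.List.pyRange h0 (n + 1) 1).map (fun h => n - h + 1)).sum := by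
      rw [← List.sum_map_mul_left]
    have hfd : PySem.Int.floordiv ((n - h0 + 1) * (n - h0 + 1 + 1)) 2
        = ((PySem.List.pyRange h0 (n + 1) 1).map (fun h => n - h + 1)).sum := by
      rw [PySem.Int.floordiv_eq_iff_of_pos (by norm_num)]
      omega
    rw [hmul, hfd]
  · -- h0 > n: no height qualifies, the loop adds nothing
    rw [if_neg hcase]
    exact pv_fold_id _ _ count (by
      intro acc h hm
      rw [PySem.List.mem_pyRange_one] at hm
      exact if_neg (by rw [hcond h hm.1]; omega))

-- ===== VERDICT (by name: the statement is the Claim_ definition above) =====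
theorem count_rectangles_with_perimeter_spec : Claim_equal_count_rectangles_with_perimeter := by
  intro n m p _
  unfold Spec_count_rectangles_with_perimeter count_rectangles_with_perimeter count_rectangles_with_perimeter_alt
  exact PySem.List.foldl_congr_mem _ _ _ 0 (fun acc w _ => pv_inner n m p w acc)
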